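-- pv_equiv track=rewrite | github.com/vosslab/bkchem-oasa | tools/calibrate_glyph_model.py | _split_glyphs_by_gap
-- ===== SOURCE A (Python) =====
-- def _split_glyphs_by_gap(
-- 		runs: list[tuple[int, int]],
-- 		min_gap_px: int = 2) -> list[tuple[int, int]]:
-- 	"""Merge adjacent column runs and split by gaps to isolate glyphs."""
-- 	if not runs:
-- 		return []
-- 	merged = [runs[0]]
-- 	for start, end in runs[1:]:
-- 		prev_start, prev_end = merged[-1]
-- 		# If gap between runs is small, merge them (they're part of same glyph)
-- 		if start - prev_end <= min_gap_px:
-- 			merged[-1] = (prev_start, end)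
-- 		else:
-- 			merged.append((start, end))
-- 	return merged
-- ===== SOURCE B (Python) =====
-- def _split_glyphs_by_gap(
-- 		runs: list[tuple[int, int]],
-- 		min_gap_px: int = 2) -> list[tuple[int, int]]:
-- 	"""Merge adjacent column runs and split by gaps to isolate glyphs."""
-- 	if not runs:
-- 		return []
-- 	n = len(runs)
-- 	# Phase 1: indices where a new group begins (a big gap to the previous run).
-- 	starts = [0] + [i for i in range(1, n)
-- 	                if runs[i][0] - runs[i - 1][1] > min_gap_px]
-- 	# Phase 2: each group spans from one boundary to the next; emit its extent.
-- 	ends = starts[1:] + [n]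
-- 	return [(runs[a][0], runs[b - 1][1]) for a, b in zip(starts, ends)]
-- ===== Notes on version B (the rewrite author's own statement) =====
-- stated objective: alternative
-- what changed: B is a two-phase boundaries-then-collect rewrite: a first pass over index pairs collects the indices where a new group starts (gap to the immediate predecessor exceeds min_gap_px), then a comprehension zips consecutive boundaries and emits (first run's start, last run's end) per group, instead of A's single pass that appends and repeatedly rewrites merged[-1].
import Mathlib
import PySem

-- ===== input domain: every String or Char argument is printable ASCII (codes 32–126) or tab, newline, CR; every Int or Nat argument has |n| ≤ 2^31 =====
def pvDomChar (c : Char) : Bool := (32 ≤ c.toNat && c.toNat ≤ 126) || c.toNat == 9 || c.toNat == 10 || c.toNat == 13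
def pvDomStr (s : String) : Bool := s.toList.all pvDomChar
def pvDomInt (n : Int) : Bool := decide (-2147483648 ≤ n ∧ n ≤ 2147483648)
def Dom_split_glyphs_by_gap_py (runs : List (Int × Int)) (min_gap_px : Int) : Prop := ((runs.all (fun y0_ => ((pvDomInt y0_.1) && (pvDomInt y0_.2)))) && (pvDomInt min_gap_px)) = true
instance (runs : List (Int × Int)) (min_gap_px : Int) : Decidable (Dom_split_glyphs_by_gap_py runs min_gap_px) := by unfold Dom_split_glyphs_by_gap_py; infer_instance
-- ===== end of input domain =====

-- B replaces A's append-and-mutate-last single pass by a two-phase boundaries-then-collect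
-- structure: first the list of indices where a new group starts, then one output pair per
-- pair of consecutive boundaries (objective: alternative, same cost).

-- ===== PORT A =====
-- A: merged starts as [runs[0]]; each further run either rewrites merged's last element or appends.
def split_glyphs_by_gap_py (runs : List (Int × Int)) (min_gap_px : Int) : List (Int × Int) :=
  match runs with
  | [] => []
  | r0 :: rest =>
    rest.foldl (fun merged r =>
      match merged.getLast? with
      | some (prev_start, prev_end) =>
        if r.1 - prev_end ≤ min_gap_px then
          merged.dropLast ++ [(prev_start, r.2)]
        else
          merged ++ [r]
      | none => merged ++ [r]  -- unreachable: merged is never empty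
      ) [r0]

-- ===== PORT B =====
-- B: phase 1 collects the group-start indices, phase 2 zips consecutive boundaries and
-- emits one (first run's start, last run's end) per group.  Every index fed to pyGetD is
-- in range (starts ⊆ [0, n), ends ⊆ [1, n]), so pyGetD is exact for Python's runs[i].
def split_glyphs_by_gap_py_alt (runs : List (Int × Int)) (min_gap_px : Int) : List (Int × Int) :=
  match runs with
  | [] => []
  | _ :: _ =>
    let n : Int := runs.length
    let starts : List Int := 0 :: (PySem.List.pyRange 1 n 1).filter
        (fun i => decide (min_gap_px <
          (PySem.List.pyGetD runs i (0, 0)).1 - (PySem.List.pyGetD runs (i - 1) (0, 0)).2))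
    let ends : List Int := starts.tail ++ [n]   -- starts[1:] + [n]; starts is nonempty
    (starts.zip ends).map (fun p =>
      ((PySem.List.pyGetD runs p.1 (0, 0)).1, (PySem.List.pyGetD runs (p.2 - 1) (0, 0)).2))

-- ===== PRECONDITION & SPEC =====
def Spec_split_glyphs_by_gap_py (runs : List (Int × Int)) (min_gap_px : Int) (out : List (Int × Int)) : Prop := out = split_glyphs_by_gap_py_alt runs min_gap_px
instance (runs : List (Int × Int)) (min_gap_px : Int) (out : List (Int × Int)) : Decidable (Spec_split_glyphs_by_gap_py runs min_gap_px out) := by unfold Spec_split_glyphs_by_gap_py; infer_instance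

-- ===== CLAIM (what is proved, stated in full; the proofs are below) =====
def Claim_equal_split_glyphs_by_gap_py : Prop := ∀ (runs : List (Int × Int)) (min_gap_px : Int), Dom_split_glyphs_by_gap_py runs min_gap_px → Spec_split_glyphs_by_gap_py runs min_gap_px (split_glyphs_by_gap_py runs min_gap_px)

-- ===== LEMMAS AND PROOFS =====

-- Common recursive characterisation: one emitted pair per gap-connected group,
-- (s, e) = open group's start and the previous run's end.
def sAltGo (g : Int) : Int → Int → List (Int × Int) → List (Int × Int)
  | s, e, [] => [(s, e)]
  | s, e, (a, b) :: rest =>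
    if a - e ≤ g then sAltGo g s b rest
    else (s, e) :: sAltGo g a b rest

-- Invariant of A's loop: with accumulated output acc and open group (s,e) at the end,
-- the rest of the fold appends exactly the groups for the remaining runs.
theorem splitA_invariant (g : Int) (rest : List (Int × Int)) :
    ∀ (acc : List (Int × Int)) (s e : Int),
    rest.foldl (fun merged r =>
      match merged.getLast? with
      | some (prev_start, prev_end) =>
        if r.1 - prev_end ≤ g then merged.dropLast ++ [(prev_start, r.2)]
        else merged ++ [r]
      | none => merged ++ [r]) (acc ++ [(s, e)])
    = acc ++ sAltGo g s e rest := by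
  induction rest with
  | nil => intro acc s e; simp [sAltGo]
  | cons hd tl ih =>
    intro acc s e
    obtain ⟨a, b⟩ := hd
    simp only [List.foldl_cons, List.getLast?_concat, sAltGo]
    by_cases h : a - e ≤ g
    · rw [if_pos h, if_pos h, List.dropLast_concat]
      exact ih acc s b
    · rw [if_neg h, if_neg h]
      have := ih (acc ++ [(s, e)]) a b
      simpa using this

-- B-side Nat rendering: the break-index predicate and the boundary list.
def bCond (rs : List (Int × Int)) (g : Int) (i : Nat) : Bool :=
  decide (g < (rs.getD i (0, 0)).1 - (rs.getD (i - 1) (0, 0)).2)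

def bCuts (rs : List (Int × Int)) (g : Int) : List Nat :=
  (List.range' 1 (rs.length - 1)).filter (bCond rs g)

theorem bCuts_ge_one (rs : List (Int × Int)) (g : Int) : ∀ t ∈ bCuts rs g, 1 ≤ t := by
  intro t ht
  exact (List.mem_range'_1.mp (List.mem_of_mem_filter ht)).1

-- Collecting phase 2 recursively over the boundary list.
def bGo (rs : List (Int × Int)) : Nat → List Nat → List (Int × Int)
  | c, [] => [((rs.getD c (0, 0)).1, (rs.getD (rs.length - 1) (0, 0)).2)]
  | c, t :: T => ((rs.getD c (0, 0)).1, (rs.getD (t - 1) (0, 0)).2) :: bGo rs t T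

def setHeadFst (s : Int) : List (Int × Int) → List (Int × Int)
  | [] => []
  | (_, y) :: t => (s, y) :: t

-- zip-of-boundaries = bGo
theorem zip_map_eq_bGo (rs : List (Int × Int)) (T : List Nat) :
    ∀ c : Nat,
    ((c :: T).zip (T ++ [rs.length])).map
      (fun p => ((rs.getD p.1 (0, 0)).1, (rs.getD (p.2 - 1) (0, 0)).2))
    = bGo rs c T := by
  induction T with
  | nil => intro c; simp [bGo]
  | cons t T ih =>
    intro c
    rw [List.cons_append, List.zip_cons_cons, List.map_cons, ih t]
    rfl

theorem bridge_alt (runs : List (Int × Int)) (g : Int) (h : runs ≠ []) :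
    split_glyphs_by_gap_py_alt runs g = bGo runs 0 (bCuts runs g) := by
  obtain ⟨r, rest, rfl⟩ : ∃ r rest, runs = r :: rest := by
    cases runs with
    | nil => exact absurd rfl h
    | cons a l => exact ⟨a, l, rfl⟩
  have key1 : PySem.List.pyRange 1 (((r :: rest).length : Int)) 1
      = (List.range' 1 ((r :: rest).length - 1)).map (fun (k : Nat) => (k : Int)) := by
    rw [PySem.List.pyRange_one, List.range'_eq_map_range, List.map_map]
    rw [show (((r :: rest).length : Int) - 1).toNat = (r :: rest).length - 1 from by omega]
    apply List.map_congr_left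
    intro a _
    simp only [Function.comp_apply]
    push_cast
    ring
  have key2 : ((PySem.List.pyRange 1 (((r :: rest).length : Int)) 1).filter
        (fun i => decide (g < (PySem.List.pyGetD (r :: rest) i (0, 0)).1
          - (PySem.List.pyGetD (r :: rest) (i - 1) (0, 0)).2)))
      = (bCuts (r :: rest) g).map (fun (k : Nat) => (k : Int)) := by
    rw [key1, List.filter_map]
    unfold bCuts
    refine congrArg _ ?_
    apply List.filter_congr
    intro i hi
    have h1 : 1 ≤ i := (List.mem_range'_1.mp hi).1
    show decide (g < (PySem.List.pyGetD (r :: rest) (i : Int) (0, 0)).1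
        - (PySem.List.pyGetD (r :: rest) ((i : Int) - 1) (0, 0)).2) = bCond (r :: rest) g i
    rw [show ((i : Int) - 1) = ((i - 1 : Nat) : Int) from by omega]
    unfold bCond
    simp
  show ((0 :: (PySem.List.pyRange 1 (((r :: rest).length : Int)) 1).filter
        (fun i => decide (g < (PySem.List.pyGetD (r :: rest) i (0, 0)).1
          - (PySem.List.pyGetD (r :: rest) (i - 1) (0, 0)).2))).zip
        (((0 :: (PySem.List.pyRange 1 (((r :: rest).length : Int)) 1).filter
        (fun i => decide (g < (PySem.List.pyGetD (r :: rest) i (0, 0)).1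
          - (PySem.List.pyGetD (r :: rest) (i - 1) (0, 0)).2))).tail) ++ [((r :: rest).length : Int)])).map
      (fun p => ((PySem.List.pyGetD (r :: rest) p.1 (0, 0)).1,
                 (PySem.List.pyGetD (r :: rest) (p.2 - 1) (0, 0)).2))
    = bGo (r :: rest) 0 (bCuts (r :: rest) g)
  rw [key2, List.tail_cons,
      show ((0 : Int) :: (bCuts (r :: rest) g).map (fun (k : Nat) => (k : Int)))
        = (0 :: bCuts (r :: rest) g).map (fun (k : Nat) => (k : Int)) from by simp,
      show ((bCuts (r :: rest) g).map (fun (k : Nat) => (k : Int)) ++ [((r :: rest).length : Int)])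
        = (bCuts (r :: rest) g ++ [(r :: rest).length]).map (fun (k : Nat) => (k : Int)) from by simp,
      List.zip_map, List.map_map]
  refine (List.map_congr_left ?_).trans (zip_map_eq_bGo (r :: rest) (bCuts (r :: rest) g) 0)
  intro p hp
  obtain ⟨p1, p2⟩ := p
  have hmem := List.of_mem_zip hp
  have h2 : 1 ≤ p2 := by
    rcases List.mem_append.mp hmem.2 with h' | h'
    · exact bCuts_ge_one (r :: rest) g p2 h'
    · simp only [List.mem_singleton] at h'
      rw [h']
      simp
  simp only [Function.comp_apply, Prod.map_apply]
  rw [show ((p2 : Int) - 1) = ((p2 - 1 : Nat) : Int) from by omega]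
  simp

theorem sAltGo_setHeadFst (g e s s' : Int) (rest : List (Int × Int)) :
    sAltGo g s e rest = setHeadFst s (sAltGo g s' e rest) := by
  induction rest generalizing s s' e with
  | nil => simp [sAltGo, setHeadFst]
  | cons hd tl ih =>
    obtain ⟨a, b⟩ := hd
    simp only [sAltGo]
    by_cases h : a - e ≤ g
    · rw [if_pos h, if_pos h]; exact ih b s s'
    · rw [if_neg h, if_neg h]; simp [setHeadFst]

-- shifting bGo past a cons
theorem bGo_shift (r0 : Int × Int) (small : List (Int × Int)) (hs : small ≠ [])
    (T : List Nat) (hT : ∀ t ∈ T, 1 ≤ t) :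
    ∀ c : Nat, bGo (r0 :: small) (c + 1) (T.map (· + 1)) = bGo small c T := by
  induction T with
  | nil =>
    intro c
    simp only [List.map_nil, bGo, List.getD_cons_succ]
    have : (r0 :: small).length - 1 = (small.length - 1) + 1 := by
      cases small with | nil => exact absurd rfl hs | cons a l => simp
    rw [this, List.getD_cons_succ]
  | cons t T ih =>
    intro c
    have ht : 1 ≤ t := hT t (by simp)
    have hT' : ∀ t ∈ T, 1 ≤ t := fun x hx => hT x (by simp [hx])
    simp only [List.map_cons, bGo, List.getD_cons_succ]
    have h1 : t + 1 - 1 = (t - 1) + 1 := by omega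
    rw [h1, List.getD_cons_succ, ih hT' t]

theorem bGo_shift_zero (r0 : Int × Int) (small : List (Int × Int)) (hs : small ≠ [])
    (T : List Nat) (hT : ∀ t ∈ T, 1 ≤ t) :
    bGo (r0 :: small) 0 (T.map (· + 1)) = setHeadFst r0.1 (bGo small 0 T) := by
  cases T with
  | nil =>
    simp only [List.map_nil, bGo, List.getD_cons_zero, setHeadFst]
    have : (r0 :: small).length - 1 = (small.length - 1) + 1 := by
      cases small with | nil => exact absurd rfl hs | cons a l => simp
    rw [this, List.getD_cons_succ]
  | cons t T =>
    have ht : 1 ≤ t := hT t (by simp)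
    have hT' : ∀ x ∈ T, 1 ≤ x := fun x hx => hT x (by simp [hx])
    simp only [List.map_cons, bGo, List.getD_cons_zero, setHeadFst]
    have h1 : t + 1 - 1 = (t - 1) + 1 := by omega
    rw [h1, List.getD_cons_succ, bGo_shift r0 small hs T hT' t]

-- cuts of a cons: the first possible break plus the shifted cuts of the tail
theorem bCuts_cons (r0 x : Int × Int) (tl : List (Int × Int)) (g : Int) :
    bCuts (r0 :: x :: tl) g
      = (if bCond (r0 :: x :: tl) g 1 then [1] else [])
        ++ (bCuts (x :: tl) g).map (· + 1) := by
  unfold bCuts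
  rw [show (r0 :: x :: tl).length - 1 = tl.length + 1 from by simp, List.range'_succ]
  have hshift : List.range' 2 tl.length = (List.range' 1 tl.length).map (· + 1) :=
    List.range'_succ_left
  rw [List.filter_cons, hshift, List.filter_map]
  have hcong : (List.range' 1 tl.length).filter ((bCond (r0 :: x :: tl) g) ∘ (· + 1))
      = (List.range' 1 tl.length).filter (bCond (x :: tl) g) := by
    apply List.filter_congr
    intro i hi
    have h1 : 1 ≤ i := (List.mem_range'_1.mp hi).1
    obtain ⟨j, rfl⟩ : ∃ j, i = j + 1 := ⟨i - 1, by omega⟩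
    show bCond (r0 :: x :: tl) g (j + 1 + 1) = bCond (x :: tl) g (j + 1)
    unfold bCond
    simp
  rw [hcong, show (x :: tl).length - 1 = tl.length from by simp]
  by_cases hb : bCond (r0 :: x :: tl) g 1
  · simp [hb]
  · simp [hb]

theorem main_eq (g : Int) (rest : List (Int × Int)) :
    ∀ r0 : Int × Int, bGo (r0 :: rest) 0 (bCuts (r0 :: rest) g) = sAltGo g r0.1 r0.2 rest := by
  induction rest with
  | nil =>
    intro r0
    simp [bCuts, bGo, sAltGo]
  | cons hd tl ih =>
    intro r0
    obtain ⟨a, b⟩ := hd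
    obtain ⟨s, e⟩ := r0
    have hge := bCuts_ge_one ((a, b) :: tl) g
    rw [bCuts_cons (s, e) (a, b) tl g]
    have hb : bCond ((s, e) :: (a, b) :: tl) g 1 = decide (g < a - e) := by
      unfold bCond
      rfl
    simp only [sAltGo]
    by_cases h : a - e ≤ g
    · have hbf : bCond ((s, e) :: (a, b) :: tl) g 1 = false := by
        rw [hb]; simp; omega
      rw [hbf, if_neg (by simp), List.nil_append,
          bGo_shift_zero (s, e) ((a, b) :: tl) (by simp) _ hge, ih (a, b),
          if_pos h]
      exact (sAltGo_setHeadFst g b s a tl).symm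
    · have hbt : bCond ((s, e) :: (a, b) :: tl) g 1 = true := by
        rw [hb]; simp; omega
      rw [hbt, if_pos rfl, if_neg h, List.singleton_append]
      simp only [bGo]
      have h2 : bGo ((s, e) :: (a, b) :: tl) 1 ((bCuts ((a, b) :: tl) g).map (· + 1))
          = bGo ((a, b) :: tl) 0 (bCuts ((a, b) :: tl) g) :=
        bGo_shift (s, e) ((a, b) :: tl) (by simp) _ hge 0
      rw [h2, ih (a, b)]
      rfl

-- ===== VERDICT (by name: the statement is the Claim_ definition above) =====
theorem split_glyphs_by_gap_py_spec : Claim_equal_split_glyphs_by_gap_py := by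
  intro runs g _
  unfold Spec_split_glyphs_by_gap_py
  match runs with
  | [] => rfl
  | r0 :: rest =>
    rw [bridge_alt _ g (by simp), main_eq g rest r0]
    show split_glyphs_by_gap_py (r0 :: rest) g = _
    unfold split_glyphs_by_gap_py
    simpa using splitA_invariant g rest [] r0.1 r0.2
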